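-- pv_equiv track=rewrite | github.com/PaulCalot/hackathon-airbus | ManeuverDetectionDataset.py | get_maneuver_data_point_indexes
-- ===== SOURCE A (Python) =====
-- def get_maneuver_data_point_indexes(times, time):
--     left_index = 0
--     right_index = len(times) - 1
--     while(left_index != right_index - 1):
--         m = (left_index + right_index)//2
--         if(times[m] > time):
--             right_index = m
--         elif(times[m] < time):
--             left_index = m
--         else:
--             return (m, m)
--     return left_index, right_index
-- ===== SOURCE B (Python) =====
-- def get_maneuver_data_point_indexes(times, time):
--     # Recursive divide-and-conquer over (lo, width): the bracket is [lo, lo+w].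
--     def rec(lo, w):
--         if w == 1:
--             return (lo, lo + 1)
--         m = lo + w // 2
--         v = times[m]
--         if v == time:
--             return (m, m)
--         if v > time:
--             return rec(lo, w // 2)
--         return rec(m, w - w // 2)
--     return rec(0, len(times) - 1)
-- ===== Notes on version B (the rewrite author's own statement) =====
-- stated objective: alternative
-- what changed: The imperative while-loop over mutable (left,right) indices is replaced by a recursive divide-and-conquer helper over (lo, width), returning the bracket when the width reaches 1.
import Mathlib
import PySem

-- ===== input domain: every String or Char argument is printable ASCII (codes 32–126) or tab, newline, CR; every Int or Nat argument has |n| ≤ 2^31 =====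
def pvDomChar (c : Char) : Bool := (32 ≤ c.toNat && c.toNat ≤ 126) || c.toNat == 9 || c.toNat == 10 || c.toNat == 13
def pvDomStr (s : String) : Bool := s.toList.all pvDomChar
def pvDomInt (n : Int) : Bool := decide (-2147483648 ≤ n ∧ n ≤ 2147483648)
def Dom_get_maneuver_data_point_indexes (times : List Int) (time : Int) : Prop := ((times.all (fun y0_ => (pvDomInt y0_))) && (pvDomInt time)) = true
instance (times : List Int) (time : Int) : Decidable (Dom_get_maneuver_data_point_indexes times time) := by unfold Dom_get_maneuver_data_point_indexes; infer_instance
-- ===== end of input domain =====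

-- B restructures A's while-loop as a recursion over (lo, width); same recurrence, different decomposition ("alternative").

-- ===== PORT A =====
-- A's while-loop, made total with fuel: Pre_ admits only inputs on which the
-- Python loop terminates, and there it runs at most (length - 1) iterations,
-- so fuel (length + 2) never runs out inside Pre_. times[m] is always in
-- range inside Pre_, so the getD 0 default is never used there.
def pvALoop (times : List Int) (time : Int) : Nat → Int → Int → Int × Int
  | 0, l, r => (l, r)
  | fuel + 1, l, r =>
    if l = r - 1 then (l, r)
    else
      let m := PySem.Int.floordiv (l + r) 2
      let v := (PySem.List.pyGet? times m).getD 0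
      if v > time then pvALoop times time fuel l m
      else if v < time then pvALoop times time fuel m r
      else (m, m)

def get_maneuver_data_point_indexes (times : List Int) (time : Int) : Int × Int :=
  pvALoop times time (times.length + 2) 0 ((times.length : Int) - 1)

-- ===== PORT B =====
-- Source B's rec(lo, w); w is a Nat here (inside Pre_ the Python width is ≥ 0).
-- At w = 0 the Python recursion returns (m, m) = (lo, lo) on a match and
-- diverges otherwise (outside Pre_); both arms are (lo, lo) here.
def pvBRec (times : List Int) (time : Int) (lo : Int) : Nat → Int × Int
  | 0 => (lo, lo)
  | 1 => (lo, lo + 1)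
  | w + 2 =>
      let m := lo + (((w + 2) / 2 : Nat) : Int)
      let v := (PySem.List.pyGet? times m).getD 0
      if v = time then (m, m)
      else if v > time then pvBRec times time lo ((w + 2) / 2)
      else pvBRec times time m ((w + 2) - (w + 2) / 2)

def get_maneuver_data_point_indexes_alt (times : List Int) (time : Int) : Int × Int :=
  pvBRec times time 0 (times.length - 1)

-- ===== PRECONDITION & SPEC =====
-- Pre_ excludes exactly the inputs on which A does not return: the empty list
-- (IndexError) and a singleton whose element differs from time (infinite loop).
def Pre_get_maneuver_data_point_indexes (times : List Int) (time : Int) : Prop :=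
  2 ≤ times.length ∨ times = [time]
instance (times : List Int) (time : Int) : Decidable (Pre_get_maneuver_data_point_indexes times time) := by unfold Pre_get_maneuver_data_point_indexes; infer_instance

def pvWitness_get_maneuver_data_point_indexes : List Int × Int := ([0, 10], 5)

def Spec_get_maneuver_data_point_indexes (times : List Int) (time : Int) (out : Int × Int) : Prop := out = get_maneuver_data_point_indexes_alt times time
instance (times : List Int) (time : Int) (out : Int × Int) : Decidable (Spec_get_maneuver_data_point_indexes times time out) := by unfold Spec_get_maneuver_data_point_indexes; infer_instance

-- ===== CLAIM (what is proved, stated in full; the proofs are below) =====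
def Claim_equal_get_maneuver_data_point_indexes : Prop := ∀ (times : List Int) (time : Int), Dom_get_maneuver_data_point_indexes times time → Pre_get_maneuver_data_point_indexes times time → Spec_get_maneuver_data_point_indexes times time (get_maneuver_data_point_indexes times time)

-- ===== LEMMAS AND PROOFS =====

-- Core: A's loop on the interval [lo, lo+w] equals B's recursion on (lo, w),
-- provided the fuel exceeds the width.
theorem pvALoop_eq_pvBRec (times : List Int) (time : Int) :
    ∀ w fuel lo, 1 ≤ w → w < fuel →
      pvALoop times time fuel lo (lo + (w : Int)) = pvBRec times time lo w := by
  intro w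
  induction w using Nat.strong_induction_on with
  | _ w ih =>
    intro fuel lo hw hfuel
    match fuel with
    | 0 => omega
    | fuel + 1 =>
      match w with
      | 1 => simp [pvALoop, pvBRec]
      | w + 2 =>
        have hm : PySem.Int.floordiv (lo + (lo + ((w + 2 : Nat) : Int))) 2
            = lo + (((w + 2) / 2 : Nat) : Int) := by
          rw [PySem.Int.floordiv_eq_iff_of_pos (by norm_num)]
          push_cast; omega
        simp only [pvALoop, pvBRec]
        have hne : ¬ (lo = lo + ((w + 2 : Nat) : Int) - 1) := by push_cast; omega
        rw [if_neg hne, hm]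
        set v := (PySem.List.pyGet? times (lo + (((w + 2) / 2 : Nat) : Int))).getD 0 with hv
        by_cases h1 : v > time
        · rw [if_pos h1, if_neg (by omega : ¬ v = time), if_pos h1]
          have := ih ((w + 2) / 2) (by omega) fuel lo (by omega) (by omega)
          rw [← this]
        · rw [if_neg h1]
          by_cases h2 : v < time
          · rw [if_pos h2, if_neg (by omega : ¬ v = time), if_neg h1]
            have := ih ((w + 2) - (w + 2) / 2) (by omega) fuel
              (lo + (((w + 2) / 2 : Nat) : Int)) (by omega) (by omega)
            rw [← this]
            congr 1
            push_cast
            omega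
          · rw [if_neg h2, if_pos (by omega : v = time)]

-- ===== VERDICT (by name: the statement is the Claim_ definition above) =====
theorem get_maneuver_data_point_indexes_spec : Claim_equal_get_maneuver_data_point_indexes := by
  intro times time _ hpre
  unfold Spec_get_maneuver_data_point_indexes
  rcases hpre with h2 | h1
  · unfold get_maneuver_data_point_indexes get_maneuver_data_point_indexes_alt
    have hw : ((times.length : Int) - 1) = (0 : Int) + ((times.length - 1 : Nat) : Int) := by
      push_cast [Nat.cast_sub (by omega : 1 ≤ times.length)]; ring
    rw [hw]
    exact pvALoop_eq_pvBRec times time (times.length - 1) (times.length + 2) 0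
      (by omega) (by omega)
  · subst h1
    simp [get_maneuver_data_point_indexes, get_maneuver_data_point_indexes_alt,
      pvALoop, pvBRec, PySem.Int.floordiv, PySem.List.pyGet?, PySem.List.pyIdx?]
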